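-- pv_equiv track=rewrite | github.com/DANIS615/api-spriconsole | capturar_protocolo_gpbox.py | analizar_frame
-- ===== SOURCE A (Python) =====
-- def analizar_frame(data):
--     """Análisis básico del frame"""
--     analisis = []
--
--     # Verificar delimitadores comunes
--     if len(data) > 0:
--         if data[0] == 0x10:
--             analisis.append("DLE inicial (Gilbarco)")
--         elif data[0] == 0x02:
--             analisis.append("STX")
--         elif data[0] == 0x01:
--             analisis.append("SOH")
--
--     if len(data) > 1:
--         if data[-1] == 0x03:
--             analisis.append("ETX final")
--
--     # Buscar patrones
--     if 0x10 in data and 0x02 in data: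
--         analisis.append("Posible frame Gilbarco")
--
--     # Detectar dirección de bomba (típicamente 0x31-0x36 = '1'-'6')
--     bombas_detectadas = []
--     for i, b in enumerate(data):
--         if 0x31 <= b <= 0x36:  # '1' to '6'
--             bombas_detectadas.append(f"Bomba {chr(b)} en posición {i}")
--
--     if bombas_detectadas:
--         analisis.extend(bombas_detectadas)
--
--     return analisis
-- ===== SOURCE B (Python) =====
-- def analizar_frame(data):
--     """Análisis básico del frame — single linear pass with flags and accumulators."""
--     lead = None
--     has_10 = False
--     has_02 = False
--     last = None
--     bombas = []
--     n = 0
--     for i, b in enumerate(data):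
--         if i == 0:
--             if b == 0x10:
--                 lead = "DLE inicial (Gilbarco)"
--             elif b == 0x02:
--                 lead = "STX"
--             elif b == 0x01:
--                 lead = "SOH"
--         if b == 0x10:
--             has_10 = True
--         elif b == 0x02:
--             has_02 = True
--         if 0x31 <= b <= 0x36:
--             bombas.append(f"Bomba {chr(b)} en posición {i}")
--         last = b
--         n += 1
--     analisis = []
--     if lead is not None:
--         analisis.append(lead)
--     if n > 1 and last == 0x03:
--         analisis.append("ETX final")
--     if has_10 and has_02:
--         analisis.append("Posible frame Gilbarco")
--     analisis.extend(bombas)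
--     return analisis
-- ===== Notes on version B (the rewrite author's own statement) =====
-- stated objective: alternative
-- what changed: B replaces A's multiple scans (two 'in' membership scans plus a separate pump-detection loop and head/tail indexing) with one linear pass over enumerate(data) that maintains flags, the last byte, a count and the pump list, assembling the result afterwards.
import Mathlib
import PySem

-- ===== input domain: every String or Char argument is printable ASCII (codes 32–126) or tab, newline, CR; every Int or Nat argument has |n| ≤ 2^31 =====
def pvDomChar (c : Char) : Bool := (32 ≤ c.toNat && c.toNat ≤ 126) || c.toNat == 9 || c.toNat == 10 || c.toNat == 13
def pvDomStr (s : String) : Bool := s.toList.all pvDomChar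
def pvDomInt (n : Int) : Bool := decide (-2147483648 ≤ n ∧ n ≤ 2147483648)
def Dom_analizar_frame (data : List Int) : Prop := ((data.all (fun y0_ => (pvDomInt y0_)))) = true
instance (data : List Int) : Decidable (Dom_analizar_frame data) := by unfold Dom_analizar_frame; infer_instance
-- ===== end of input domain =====

set_option maxHeartbeats 1000000


-- B changes the decomposition to a single pass with flags/accumulators; same results, no speed claim.

-- ===== PORT A =====
-- f"Bomba {chr(b)} en posición {i}" (b is always 0x31..0x36 here, so chr is exact)
def pumpMsg (i b : Int) : String :=
  "Bomba " ++ String.ofList [Char.ofNat b.toNat] ++ " en posición " ++ PySem.Int.toStr i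

def analizar_frame (data : List Int) : List String :=
  let analisis : List String := []
  let analisis :=
    if data.length > 0 then
      if PySem.List.pyGet? data 0 = some 16 then analisis ++ ["DLE inicial (Gilbarco)"]
      else if PySem.List.pyGet? data 0 = some 2 then analisis ++ ["STX"]
      else if PySem.List.pyGet? data 0 = some 1 then analisis ++ ["SOH"]
      else analisis
    else analisis
  let analisis :=
    if data.length > 1 then
      if PySem.List.pyGet? data (-1) = some 3 then analisis ++ ["ETX final"] else analisis
    else analisis
  let analisis :=
    if (16 : Int) ∈ data ∧ (2 : Int) ∈ data then analisis ++ ["Posible frame Gilbarco"] else analisis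
  let bombas :=
    (PySem.List.enumerate data 0).foldl
      (fun acc ib => if 49 ≤ ib.2 ∧ ib.2 ≤ 54 then acc ++ [pumpMsg ib.1 ib.2] else acc) []
  if bombas ≠ [] then analisis ++ bombas else analisis

-- ===== PORT B =====
-- loop state: (lead, has_10, has_02, last, bombas, n)
def bStep (st : Option String × Bool × Bool × Option Int × List String × Int)
    (ib : Int × Int) : Option String × Bool × Bool × Option Int × List String × Int :=
  match st, ib with
  | (lead, h10, h02, _last, bomb, n), (i, b) =>
    ( if i = 0 then
        (if b = 16 then some "DLE inicial (Gilbarco)"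
         else if b = 2 then some "STX"
         else if b = 1 then some "SOH"
         else lead)
      else lead,
      if b = 16 then true else h10,
      if b = 16 then h02 else if b = 2 then true else h02,
      some b,
      if 49 ≤ b ∧ b ≤ 54 then bomb ++ [pumpMsg i b] else bomb,
      n + 1 )

def analizar_frame_alt (data : List Int) : List String :=
  match (PySem.List.enumerate data 0).foldl bStep (none, false, false, none, [], 0) with
  | (lead, h10, h02, last, bomb, n) =>
    (match lead with | some s => [s] | none => []) ++
    (if n > 1 ∧ last = some 3 then ["ETX final"] else []) ++
    (if h10 && h02 then ["Posible frame Gilbarco"] else []) ++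
    bomb

-- ===== PRECONDITION & SPEC =====
def Spec_analizar_frame (data : List Int) (out : List String) : Prop := out = analizar_frame_alt data
instance (data : List Int) (out : List String) : Decidable (Spec_analizar_frame data out) := by unfold Spec_analizar_frame; infer_instance

-- ===== CLAIM (what is proved, stated in full; the proofs are below) =====
def Claim_equal_analizar_frame : Prop := ∀ (data : List Int), Dom_analizar_frame data → Spec_analizar_frame data (analizar_frame data)

-- ===== LEMMAS AND PROOFS =====

-- invariant of B's loop over the tail (start index s ≥ 1, so the i == 0 branch never fires)
theorem bStep_tail (t : List Int) : ∀ (s : Int), 1 ≤ s →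
    ∀ (lead : Option String) (h10 h02 : Bool) (last : Option Int) (bomb : List String) (n : Int),
    (PySem.List.enumerate t s).foldl bStep (lead, h10, h02, last, bomb, n) =
      (lead,
       h10 || t.contains 16,
       h02 || t.contains 2,
       t.getLast?.or last,
       bomb ++ ((PySem.List.enumerate t s).filter
                  (fun ib => decide (49 ≤ ib.2 ∧ ib.2 ≤ 54))).map (fun ib => pumpMsg ib.1 ib.2),
       n + t.length) := by
  induction t with
  | nil => intro s hs lead h10 h02 last bomb n; simp [PySem.List.enumerate_nil]
  | cons b t ih =>
    intro s hs lead h10 h02 last bomb n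
    rw [PySem.List.enumerate_cons]
    simp only [List.foldl_cons, bStep]
    rw [ih (s + 1) (by omega)]
    have hs0 : ¬ (s = 0) := by omega
    refine Prod.ext ?_ (Prod.ext ?_ (Prod.ext ?_ (Prod.ext ?_ (Prod.ext ?_ ?_))))
    · simp [hs0]
    · by_cases hb : b = 16 <;> simp [hb, eq_comm]
    · by_cases hb16 : b = 16
      · subst hb16; simp
      · by_cases hb2 : b = 2 <;> simp [hb16, hb2, eq_comm]
    · cases t with
      | nil => simp
      | cons c t' =>
        cases hg : (c :: t').getLast? with
        | none => simp at hg
        | some x => simp [List.getLast?_cons_cons, hg]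
    · by_cases hb : 49 ≤ b ∧ b ≤ 54 <;> simp [hb]
    · simp; omega

-- (if l ≠ [] then a ++ l else a) = a ++ l
theorem append_if_ne {a l : List String} : (if l ≠ [] then a ++ l else a) = a ++ l := by
  cases l <;> simp

-- peel one conditional-append layer into a segment
theorem append_ite (c : Prop) [Decidable c] (a x : List String) :
    (if c then a ++ x else a) = a ++ (if c then x else []) := by
  split_ifs <;> simp

theorem analizar_frame_spec : Claim_equal_analizar_frame := by
  intro data _
  unfold Spec_analizar_frame
  cases data with
  | nil => decide
  | cons h t =>
    unfold analizar_frame analizar_frame_alt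
    rw [PySem.List.enumerate_cons]
    simp only [List.foldl_cons, bStep]
    rw [bStep_tail t (0+1) (by omega)]
    rw [PySem.List.foldl_append_ite (fun ib : Int × Int => 49 ≤ ib.2 ∧ ib.2 ≤ 54)
        (fun ib => pumpMsg ib.1 ib.2)]
    rw [append_if_ne]
    have hget0 : PySem.List.pyGet? (h :: t) 0 = some h := by
      simp
    have hneg1 : PySem.List.pyGet? (h :: t) (-1) = (h :: t).getLast? := by
      simp [PySem.List.pyGet?_neg_one]
    have hlast : (t.getLast?).or (some h) = (h :: t).getLast? := by
      cases t with
      | nil => simp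
      | cons c t' =>
        cases hg : (c :: t').getLast? with
        | none => simp at hg
        | some x => simp [List.getLast?_cons_cons, hg]
    rw [hget0, hneg1, hlast]
    simp only [append_ite, List.nil_append]
    simp only [List.append_assoc]
    -- compare the four segments
    congr 1
    · -- leading delimiter
      by_cases e16 : h = 16 <;> by_cases e2 : h = 2 <;> by_cases e1 : h = 1 <;>
        simp [e16, e2, e1]
    · congr 1
      · -- ETX segment
        cases t with
        | nil => simp
        | cons c t' =>
          by_cases h3 : (h :: c :: t').getLast? = some 3 <;>
            simp [h3]
      · -- Gilbarco segment (the pump segments are syntactically equal after the rewrites)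
        congr 1
        by_cases hh16 : h = 16 <;> by_cases hh2 : h = 2 <;>
          by_cases m16 : (16:Int) ∈ t <;> by_cases m2 : (2:Int) ∈ t <;>
            simp_all [List.mem_cons] <;> omega
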